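-- pv_equiv track=rewrite | github.com/adsdemaybe/USACO_CSES_CF_PROBLEMS | USACO_Problems/deforestation/deforestation.py | solve_farm_problem
-- ===== SOURCE A (Python) =====
-- def solve_farm_problem(test_cases):
--     results = []
--
--     for case in test_cases:
--         N, K, positions, restrictions = case
--
--         all_positions = set(positions)
--         for l, r, _ in restrictions:
--             all_positions.add(l)
--             all_positions.add(r)
--         compressed = sorted(all_positions)
--         pos_to_index = {pos: i for i, pos in enumerate(compressed)}
--
--         compressed_length = len(compressed)
--         tree_array = [0] * compressed_length
--         for pos in positions:
--             tree_array[pos_to_index[pos]] = 1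
--
--         prefix_sum = [0] * (compressed_length + 1)
--         for i in range(compressed_length):
--             prefix_sum[i + 1] = prefix_sum[i] + tree_array[i]
--
--         def count_trees(l, r):
--             l_idx = pos_to_index[l]
--             r_idx = pos_to_index[r]
--             return prefix_sum[r_idx + 1] - prefix_sum[l_idx]
--
--         low, high = 0, N
--         while low <= high:
--             mid = (low + high) // 2
--
--             cut_trees = set(positions[:mid])
--             valid = True
--
--             for l, r, t in restrictions:
--                 trees_in_range = count_trees(l, r)
--                 remaining_trees = trees_in_range - len(cut_trees & set(range(l, r + 1)))
--                 if remaining_trees < t: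
--                     valid = False
--                     break
--
--             if valid:
--                 low = mid + 1
--             else:
--                 high = mid - 1
--
--         results.append(high)
--
--     return results
-- ===== SOURCE B (Python) =====
-- def solve_farm_problem(test_cases):
--     # For each restriction compute directly the largest cuttable prefix it
--     # allows, and take the minimum over restrictions (no binary search).
--     results = []
--     for N, K, positions, restrictions in test_cases:
--         # first occurrence (order index, value) of each distinct position
--         seen = set()
--         firsts = []
--         for j, p in enumerate(positions):
--             if p not in seen:
--                 seen.add(p)
--                 firsts.append((j, p))
--         ans = N
--         for l, r, t in restrictions:
--             # distinct trees in [l, r] as a difference of prefix counts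
--             cnt = sum(1 for _, p in firsts if p <= r) - sum(1 for _, p in firsts if p < l)
--             allow = cnt - t          # how many distinct trees in range may be cut
--             occ = [j for j, p in firsts if l <= p <= r]   # order indices of in-range trees
--             if allow < 0:
--                 bound = -1
--             elif allow < len(occ):
--                 bound = occ[allow]   # cutting this prefix index would remove one too many
--             else:
--                 bound = N
--             ans = min(ans, bound)
--         results.append(ans)
--     return results
-- ===== Notes on version B (the rewrite author's own statement) =====
-- stated objective: alternative
-- what changed: B removes A's binary search entirely: instead of re-testing all restrictions for O(log N) candidate prefixes (rebuilding the cut set and a set(range(l,r+1)) per probe), B scans the first occurrences of the distinct positions once and computes, per restriction, the largest cuttable prefix it allows in closed form (the order index of the (cnt-t+1)-th distinct in-range tree), returning the minimum over restrictions; it trades A's log-factor probe loop for one direct pass over the restrictions.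
import Mathlib
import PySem

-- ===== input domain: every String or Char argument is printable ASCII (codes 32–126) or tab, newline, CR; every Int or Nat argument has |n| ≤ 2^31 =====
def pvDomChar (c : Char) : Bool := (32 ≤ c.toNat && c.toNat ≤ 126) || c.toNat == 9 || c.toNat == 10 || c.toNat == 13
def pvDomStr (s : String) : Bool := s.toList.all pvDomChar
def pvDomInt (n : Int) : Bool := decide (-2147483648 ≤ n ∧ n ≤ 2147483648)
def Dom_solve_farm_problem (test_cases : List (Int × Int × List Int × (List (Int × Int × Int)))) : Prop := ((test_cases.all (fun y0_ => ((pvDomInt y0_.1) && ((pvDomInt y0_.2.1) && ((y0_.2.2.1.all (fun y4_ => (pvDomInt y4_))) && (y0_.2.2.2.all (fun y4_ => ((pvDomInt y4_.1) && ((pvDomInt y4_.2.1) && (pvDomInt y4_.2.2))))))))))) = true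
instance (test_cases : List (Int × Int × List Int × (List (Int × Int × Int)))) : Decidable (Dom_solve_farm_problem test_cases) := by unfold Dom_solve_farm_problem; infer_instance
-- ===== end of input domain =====

-- B replaces A's binary search (which rebuilds a cut-set and per-restriction range sets for
-- every probe) by a direct computation, per restriction, of the largest cuttable prefix.

-- ===== PORT A =====

-- the body of A's `while` loop validity check (`valid` after the inner `for` with break)
def aValid (positions : List Int) (restrictions : List (Int × Int × Int))
    (pos_to_index : PySem.Dict Int Int) (prefix_sum : List Int) (mid : Int) : Bool :=
  let cut_trees : PySem.Set Int := PySem.Set.ofList (PySem.List.slice positions none (some mid))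
  restrictions.foldl (fun valid lrt =>
    if valid then
      let l := lrt.1; let r := lrt.2.1; let t := lrt.2.2
      -- count_trees(l, r)
      let l_idx := pos_to_index.getD l 0
      let r_idx := pos_to_index.getD r 0
      let trees_in_range := PySem.List.pyGetD prefix_sum (r_idx + 1) 0 - PySem.List.pyGetD prefix_sum l_idx 0
      let remaining := trees_in_range -
        ((PySem.Set.inter cut_trees (PySem.Set.ofList (PySem.List.pyRange l (r + 1) 1))).length : Int)
      !(decide (remaining < t))
    else valid) true

-- A's `while low <= high` binary search; returns `high`
def aSearch (valid : Int → Bool) (low high : Int) : Int :=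
  if h : low ≤ high then
    let mid := PySem.Int.floordiv (low + high) 2
    if valid mid then aSearch valid (mid + 1) high else aSearch valid low (mid - 1)
  else high
termination_by (high + 1 - low).toNat
decreasing_by
  · have hm := PySem.Int.floordiv_two_mid_bounds h
    omega
  · have hm := PySem.Int.floordiv_two_mid_bounds h
    omega

-- pieces of A's per-case preprocessing (the let-chain at the top of the loop body)
def aAllPositions (positions : List Int) (restrictions : List (Int × Int × Int)) : PySem.Set Int :=
  restrictions.foldl (fun s lrt => PySem.Set.add (PySem.Set.add s lrt.1) lrt.2.1)
    (PySem.Set.ofList positions)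

def aCompressed (positions : List Int) (restrictions : List (Int × Int × Int)) : List Int :=
  PySem.List.sorted (aAllPositions positions restrictions) (fun x => x) false

def aPosToIndex (compressed : List Int) : PySem.Dict Int Int :=
  (PySem.List.enumerate compressed 0).foldl (fun d ip => d.insert ip.2 ip.1) PySem.Dict.empty

def aTreeArray (positions : List Int) (pos_to_index : PySem.Dict Int Int) (compressed_length : Nat) : List Int :=
  positions.foldl (fun arr pos => PySem.List.pySetD arr (pos_to_index.getD pos 0) 1)
    (List.replicate compressed_length (0 : Int))

def aPrefixSum (tree_array : List Int) (compressed_length : Nat) : List Int :=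
  (PySem.List.pyRange 0 (compressed_length : Int) 1).foldl
    (fun ps i => PySem.List.pySetD ps (i + 1) (PySem.List.pyGetD ps i 0 + PySem.List.pyGetD tree_array i 0))
    (List.replicate (compressed_length + 1) (0 : Int))

-- one iteration of A's outer `for case in test_cases` loop
def aCase (case : Int × Int × List Int × (List (Int × Int × Int))) : Int :=
  let N := case.1
  let positions := case.2.2.1
  let restrictions := case.2.2.2
  let compressed := aCompressed positions restrictions
  let pos_to_index := aPosToIndex compressed
  let tree_array := aTreeArray positions pos_to_index compressed.length
  let prefix_sum := aPrefixSum tree_array compressed.length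
  aSearch (aValid positions restrictions pos_to_index prefix_sum) 0 N

def solve_farm_problem (test_cases : List (Int × Int × List Int × (List (Int × Int × Int)))) : List Int :=
  test_cases.foldl (fun results case => results ++ [aCase case]) []

-- ===== PORT B =====

-- first occurrence (order index, value) of each distinct position, in order
def bFirsts (positions : List Int) : List (Int × Int) :=
  ((PySem.List.enumerate positions 0).foldl
    (fun (sf : PySem.Set Int × List (Int × Int)) jp =>
      if PySem.Set.contains sf.1 jp.2 then sf
      else (PySem.Set.add sf.1 jp.2, sf.2 ++ [jp]))
    (PySem.Set.empty, [])).2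

-- the largest cuttable prefix a single restriction allows
def bBound (N : Int) (firsts : List (Int × Int)) (lrt : Int × Int × Int) : Int :=
  let l := lrt.1; let r := lrt.2.1; let t := lrt.2.2
  let cnt : Int := (firsts.countP (fun jp => decide (jp.2 ≤ r)) : Int)
                 - (firsts.countP (fun jp => decide (jp.2 < l)) : Int)
  let allow := cnt - t
  let occ := (firsts.filter (fun jp => decide (l ≤ jp.2) && decide (jp.2 ≤ r))).map (·.1)
  if allow < 0 then -1
  else if allow < (occ.length : Int) then PySem.List.pyGetD occ allow 0
  else N

def bCase (case : Int × Int × List Int × (List (Int × Int × Int))) : Int :=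
  let N := case.1
  let positions := case.2.2.1
  let restrictions := case.2.2.2
  let firsts := bFirsts positions
  restrictions.foldl (fun ans lrt => min ans (bBound N firsts lrt)) N

def solve_farm_problem_alt (test_cases : List (Int × Int × List Int × (List (Int × Int × Int)))) : List Int :=
  test_cases.map bCase

-- ===== PRECONDITION & SPEC =====
def Spec_solve_farm_problem (test_cases : List (Int × Int × List Int × (List (Int × Int × Int)))) (out : List Int) : Prop := out = solve_farm_problem_alt test_cases
instance (test_cases : List (Int × Int × List Int × (List (Int × Int × Int)))) (out : List Int) : Decidable (Spec_solve_farm_problem test_cases out) := by unfold Spec_solve_farm_problem; infer_instance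

-- ===== CLAIM (what is proved, stated in full; the proofs are below) =====
def Claim_equal_solve_farm_problem : Prop := ∀ (test_cases : List (Int × Int × List Int × (List (Int × Int × Int)))), Dom_solve_farm_problem test_cases → Spec_solve_farm_problem test_cases (solve_farm_problem test_cases)

-- ===== LEMMAS AND PROOFS =====

theorem pv_foldl_sticky_false {α : Type} (l : List α) (g : α → Bool) :
    l.foldl (fun b x => if b then g x else b) false = false := by
  induction l with
  | nil => rfl
  | cons x l ih => simpa using ih

theorem pv_foldl_break_eq_all {α : Type} (l : List α) (g : α → Bool) :
    l.foldl (fun b x => if b then g x else b) true = l.all g := by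
  induction l with
  | nil => rfl
  | cons x l ih =>
    simp only [List.foldl_cons, if_pos]
    cases hx : g x with
    | true => simpa [List.all_cons, hx] using ih
    | false => simp [List.all_cons, hx, pv_foldl_sticky_false]

theorem pv_le_foldl_min {α : Type} (l : List α) (g : α → Int) (init mid : Int) :
    mid ≤ l.foldl (fun a x => min a (g x)) init ↔ mid ≤ init ∧ ∀ x ∈ l, mid ≤ g x := by
  induction l generalizing init with
  | nil => simp
  | cons x l ih =>
    simp only [List.foldl_cons, ih, le_min_iff, List.mem_cons]
    constructor
    · rintro ⟨⟨h1, h2⟩, h3⟩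
      exact ⟨h1, fun y hy => by rcases hy with rfl | hy; exact h2; exact h3 y hy⟩
    · rintro ⟨h1, h2⟩
      exact ⟨⟨h1, h2 x (Or.inl rfl)⟩, fun y hy => h2 y (Or.inr hy)⟩

theorem pv_foldl_min_le_init {α : Type} (l : List α) (g : α → Int) (init : Int) :
    l.foldl (fun a x => min a (g x)) init ≤ init := by
  induction l generalizing init with
  | nil => simp
  | cons x l ih => exact le_trans (ih (min init (g x))) (min_le_left _ _)

theorem pv_length_eq_of_nodup_mem {α : Type} [DecidableEq α] (l1 l2 : List α)
    (h1 : l1.Nodup) (h2 : l2.Nodup) (h : ∀ x, x ∈ l1 ↔ x ∈ l2) : l1.length = l2.length :=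
  ((List.perm_ext_iff_of_nodup h1 h2).2 h).length_eq

theorem pv_take_eq_filter_lt (C : List Int) (hC : C.Pairwise (· < ·)) (k : Nat) (hk : k < C.length) :
    C.take k = C.filter (fun p => decide (p < C[k])) := by
  induction C generalizing k with
  | nil => simp at hk
  | cons c C ih =>
    rcases List.pairwise_cons.1 hC with ⟨hc, hC'⟩
    cases k with
    | zero =>
      simp only [List.take_zero, List.getElem_cons_zero]
      rw [eq_comm, List.filter_eq_nil_iff]
      intro p hp
      rcases List.mem_cons.1 hp with rfl | hp
      · simp
      · simpa using not_lt_of_gt (hc p hp)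
    | succ k =>
      have hk' : k < C.length := by simpa using hk
      simp only [List.take_succ_cons, List.getElem_cons_succ, List.filter_cons]
      rw [if_pos (by simpa using hc _ (C.getElem_mem hk'))]
      rw [ih hC' k hk']
      rfl

theorem pv_take_succ_eq_filter_le (C : List Int) (hC : C.Pairwise (· < ·)) (k : Nat) (hk : k < C.length) :
    C.take (k + 1) = C.filter (fun p => decide (p ≤ C[k])) := by
  induction C generalizing k with
  | nil => simp at hk
  | cons c C ih =>
    rcases List.pairwise_cons.1 hC with ⟨hc, hC'⟩
    cases k with
    | zero =>
      simp only [List.take_succ_cons, List.take_zero, List.getElem_cons_zero, List.filter_cons]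
      rw [if_pos (by simp)]
      rw [eq_comm, List.cons_eq_cons]
      refine ⟨rfl, ?_⟩
      have hnil : List.filter (fun p => decide (p ≤ c)) C = [] :=
        List.filter_eq_nil_iff.2 (fun p hp => by
          simp only [decide_eq_true_eq]
          exact not_le_of_gt (hc p hp))
      exact hnil
    | succ k =>
      have hk' : k < C.length := by simpa using hk
      simp only [List.take_succ_cons, List.getElem_cons_succ, List.filter_cons]
      rw [if_pos (by simpa using le_of_lt (hc _ (C.getElem_mem hk')))]
      rw [ih hC' k hk']
      rfl

theorem pv_countP_lt_sorted (js : List Int) (hjs : js.Pairwise (· < ·)) (a : Nat) (ha : a < js.length) (mid : Int) :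
    (js.countP (fun j => decide (j < mid)) ≤ a) ↔ mid ≤ js[a] := by
  induction js generalizing a with
  | nil => simp at ha
  | cons j js ih =>
    rcases List.pairwise_cons.1 hjs with ⟨hj, hjs'⟩
    cases a with
    | zero =>
      simp only [Nat.le_zero, List.countP_eq_zero, List.getElem_cons_zero, List.mem_cons]
      constructor
      · intro h; simpa using h j (Or.inl rfl)
      · intro h y hy
        rcases hy with rfl | hy
        · simpa using not_lt_of_ge h
        · simpa using not_lt_of_gt (lt_of_le_of_lt h (hj y hy))
    | succ a =>
      have ha' : a < js.length := by simpa using ha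
      rw [List.countP_cons]
      simp only [List.getElem_cons_succ]
      by_cases hjm : j < mid
      · simp only [hjm, decide_true, if_true]
        rw [show (js.countP (fun j => decide (j < mid)) + 1 ≤ a + 1) ↔ (js.countP (fun j => decide (j < mid)) ≤ a) by omega]
        exact ih hjs' a ha'
      · have h0 : js.countP (fun x => decide (x < mid)) = 0 := by
          rw [List.countP_eq_zero]
          intro y hy
          simpa using not_lt_of_gt (lt_of_le_of_lt (le_of_not_gt hjm) (hj y hy))
        simp only [hjm, decide_false, h0]
        constructor
        · intro _; exact le_of_lt (lt_of_le_of_lt (le_of_not_gt hjm) (hj _ (js.getElem_mem ha')))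
        · intro _; simp

-- A's binary search returns `ans` whenever validity is "≤ ans" on [0, N]
theorem pv_aSearch_eq (V : Int → Bool) (N ans : Int)
    (hiff : ∀ m, 0 ≤ m → m ≤ N → (V m = true ↔ m ≤ ans)) :
    ∀ (k : Nat) (low high : Int), (high + 1 - low).toNat ≤ k → 0 ≤ low → high ≤ N →
      low ≤ ans + 1 → ans ≤ high → aSearch V low high = ans := by
  intro k
  induction k with
  | zero =>
    intro low high hk h0 hN h1 h2
    rw [aSearch, dif_neg (by omega)]
    omega
  | succ k ih =>
    intro low high hk h0 hN h1 h2
    rw [aSearch]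
    by_cases hlh : low ≤ high
    · rw [dif_pos hlh]
      have hm := PySem.Int.floordiv_two_mid_bounds hlh
      have hv := hiff (PySem.Int.floordiv (low + high) 2) (by omega) (by omega)
      by_cases hV : V (PySem.Int.floordiv (low + high) 2) = true
      · have hle := hv.1 hV
        simp only [hV, if_true]
        exact ih _ high (by omega) (by omega) hN (by omega) (by omega)
      · have hgt : ¬ (PySem.Int.floordiv (low + high) 2 ≤ ans) := fun h => hV (hv.2 h)
        simp only [hV, if_false]
        exact ih low _ (by omega) h0 (by omega) h1 (by omega)
    · rw [dif_neg hlh]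
      omega

-- the fold inside bFirsts
def pvFold (P : List Int) : PySem.Set Int × List (Int × Int) :=
  (PySem.List.enumerate P 0).foldl
    (fun sf jp => if PySem.Set.contains sf.1 jp.2 then sf else (PySem.Set.add sf.1 jp.2, sf.2 ++ [jp]))
    (PySem.Set.empty, [])

theorem pv_bFirsts_eq (P : List Int) : bFirsts P = (pvFold P).2 := rfl

theorem pv_fold_spec (P : List Int) :
    (pvFold P).1 = PySem.Set.ofList P ∧
    ((pvFold P).2.map (·.2) = PySem.Set.ofList P) ∧
    (pvFold P).2.Pairwise (fun x y => x.1 < y.1) ∧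
    (∀ jp ∈ (pvFold P).2, 0 ≤ jp.1 ∧ jp.1 < (P.length : Int)) ∧
    (∀ jp ∈ (pvFold P).2, ∀ m : Nat, (jp.1 < (m : Int) ↔ jp.2 ∈ P.take m)) := by
  induction P using List.reverseRecOn with
  | nil =>
    refine ⟨rfl, rfl, List.Pairwise.nil, ?_, ?_⟩ <;> intro jp hjp <;> simp [pvFold, PySem.List.enumerate_nil] at hjp
  | append_singleton P x ih =>
    obtain ⟨h1, h2, h3, h4, h5⟩ := ih
    have hstep : pvFold (P ++ [x]) =
        (if PySem.Set.contains (pvFold P).1 x then pvFold P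
         else (PySem.Set.add (pvFold P).1 x, (pvFold P).2 ++ [((P.length : Int), x)])) := by
      unfold pvFold
      rw [PySem.List.enumerate_append, List.foldl_append, PySem.List.enumerate_cons,
        PySem.List.enumerate_nil, List.foldl_cons, List.foldl_nil]
      norm_num
    by_cases hx : x ∈ P
    · have hc : PySem.Set.contains (pvFold P).1 x = true := by
        rw [h1]; exact (PySem.Set.contains_iff _ _).2 ((PySem.Set.mem_ofList _ _).2 hx)
      rw [hstep, if_pos hc]
      have hofl : PySem.Set.ofList (P ++ [x]) = PySem.Set.ofList P := by
        rw [PySem.Set.ofList_append_singleton, PySem.Set.add_of_mem ((PySem.Set.mem_ofList _ _).2 hx)]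
      refine ⟨h1.trans hofl.symm, h2.trans hofl.symm, h3, ?_, ?_⟩
      · intro jp hjp
        have := h4 jp hjp
        simp only [List.length_append, List.length_cons, List.length_nil]
        push_cast
        omega
      · intro jp hjp m
        by_cases hm : m ≤ P.length
        · rw [List.take_append_of_le_length hm]
          exact h5 jp hjp m
        · have hmem : jp.2 ∈ P := by
            have : jp.2 ∈ (pvFold P).2.map (·.2) := List.mem_map_of_mem hjp
            rw [h2] at this
            exact (PySem.Set.mem_ofList _ _).1 this
          constructor
          · intro _
            rw [List.take_of_length_le (by simp; omega)]
            exact List.mem_append_left _ hmem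
          · intro _
            have := (h4 jp hjp).2
            omega
    · have hc : ¬ PySem.Set.contains (pvFold P).1 x = true := by
        rw [h1]
        intro h
        exact hx ((PySem.Set.mem_ofList _ _).1 ((PySem.Set.contains_iff _ _).1 h))
      rw [hstep, if_neg hc]
      have hofl : PySem.Set.ofList (P ++ [x]) = PySem.Set.ofList P ++ [x] := by
        rw [PySem.Set.ofList_append_singleton,
          PySem.Set.add_of_not_mem (fun h => hx ((PySem.Set.mem_ofList _ _).1 h))]
      refine ⟨?_, ?_, ?_, ?_, ?_⟩
      · simp only []
        rw [h1, hofl, PySem.Set.add_of_not_mem (fun h => hx ((PySem.Set.mem_ofList _ _).1 h))]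
      · simp only [List.map_append, List.map_cons, List.map_nil, h2, hofl]
      · simp only []
        rw [List.pairwise_append]
        refine ⟨h3, List.pairwise_singleton _ _, ?_⟩
        intro a ha b hb
        rw [List.mem_singleton] at hb
        subst hb
        exact (h4 a ha).2
      · intro jp hjp
        simp only [List.mem_append, List.mem_singleton] at hjp
        simp only [List.length_append, List.length_cons, List.length_nil]
        rcases hjp with hjp | rfl
        · have := h4 jp hjp; push_cast; omega
        · simp only []
          push_cast; omega
      · intro jp hjp m
        simp only [List.mem_append, List.mem_singleton] at hjp
        rcases hjp with hjp | rfl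
        · by_cases hm : m ≤ P.length
          · rw [List.take_append_of_le_length hm]
            exact h5 jp hjp m
          · have hmem : jp.2 ∈ P := by
              have : jp.2 ∈ (pvFold P).2.map (·.2) := List.mem_map_of_mem hjp
              rw [h2] at this
              exact (PySem.Set.mem_ofList _ _).1 this
            constructor
            · intro _
              rw [List.take_of_length_le (by simp; omega)]
              exact List.mem_append_left _ hmem
            · intro _
              have := (h4 jp hjp).2
              omega
        · simp only []
          by_cases hm : m ≤ P.length
          · rw [List.take_append_of_le_length hm]
            constructor
            · intro h; exfalso; omega
            · intro h; exact absurd (List.mem_of_mem_take h) hx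
          · rw [List.take_of_length_le (by simp; omega)]
            constructor
            · intro _; exact List.mem_append_right _ (List.mem_singleton.2 rfl)
            · intro _; push_cast; omega

-- the pos_to_index dictionary maps the k-th compressed value to k
theorem pv_dictOf_getD (C : List Int) (hC : C.Nodup) :
    ∀ (k : Nat) (hk : k < C.length), (aPosToIndex C).getD (C[k]) 0 = (k : Int) := by
  induction C using List.reverseRecOn with
  | nil => intro k hk; simp at hk
  | append_singleton C x ih =>
    have hnd : C.Nodup ∧ x ∉ C := by
      rw [List.nodup_append] at hC
      refine ⟨hC.1, fun h => ?_⟩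
      exact hC.2.2 x h x (by simp) rfl
    have hstep : aPosToIndex (C ++ [x]) = (aPosToIndex C).insert x (C.length : Int) := by
      unfold aPosToIndex
      rw [PySem.List.enumerate_append, List.foldl_append, PySem.List.enumerate_cons,
        PySem.List.enumerate_nil, List.foldl_cons, List.foldl_nil]
      norm_num
    intro k hk
    rw [hstep]
    rcases Nat.lt_or_ge k C.length with hkC | hkC
    · have he : (C ++ [x])[k] = C[k] := List.getElem_append_left hkC
      have hne : C[k] ≠ x := fun h => hnd.2 (by rw [← h]; exact C.getElem_mem hkC)
      rw [he, PySem.Dict.getD_insert, if_neg hne, ih hnd.1 k hkC]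
    · have hkeq : k = C.length := by simp at hk; omega
      subst hkeq
      have he : (C ++ [x])[C.length]'(by simp) = x := by
        simp
      rw [he, PySem.Dict.getD_insert_self]

theorem pv_foldl_add2_nodup (R : List (Int × Int × Int)) :
    ∀ s : PySem.Set Int, s.Nodup →
      (R.foldl (fun s lrt => PySem.Set.add (PySem.Set.add s lrt.1) lrt.2.1) s).Nodup := by
  induction R with
  | nil => intro s hs; exact hs
  | cons lrt R ih =>
    intro s hs
    exact ih _ (PySem.Set.nodup_add _ _ (PySem.Set.nodup_add _ _ hs))

theorem pv_foldl_add2_mem (R : List (Int × Int × Int)) :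
    ∀ (s : PySem.Set Int) (x : Int),
      (x ∈ R.foldl (fun s lrt => PySem.Set.add (PySem.Set.add s lrt.1) lrt.2.1) s ↔
        x ∈ s ∨ ∃ lrt ∈ R, x = lrt.1 ∨ x = lrt.2.1) := by
  induction R with
  | nil => intro s x; simp
  | cons lrt R ih =>
    intro s x
    rw [List.foldl_cons, ih]
    rw [PySem.Set.mem_add, PySem.Set.mem_add]
    simp only [List.mem_cons]
    constructor
    · rintro (((h | h) | h) | h)
      · exact Or.inl h
      · exact Or.inr ⟨lrt, Or.inl rfl, Or.inl h⟩
      · exact Or.inr ⟨lrt, Or.inl rfl, Or.inr h⟩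
      · rcases h with ⟨q, hq, hx⟩; exact Or.inr ⟨q, Or.inr hq, hx⟩
    · rintro (h | ⟨q, (rfl | hq), hx⟩)
      · exact Or.inl (Or.inl (Or.inl h))
      · rcases hx with h | h
        · exact Or.inl (Or.inl (Or.inr h))
        · exact Or.inl (Or.inr h)
      · exact Or.inr ⟨q, hq, hx⟩

theorem pv_allPos_nodup (P : List Int) (R : List (Int × Int × Int)) : (aAllPositions P R).Nodup :=
  pv_foldl_add2_nodup R _ (PySem.Set.nodup_ofList P)

theorem pv_allPos_mem (P : List Int) (R : List (Int × Int × Int)) (x : Int) :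
    x ∈ aAllPositions P R ↔ x ∈ P ∨ ∃ lrt ∈ R, x = lrt.1 ∨ x = lrt.2.1 := by
  rw [aAllPositions, pv_foldl_add2_mem]
  rw [PySem.Set.mem_ofList]

theorem pv_C_pairwise (P : List Int) (R : List (Int × Int × Int)) : (aCompressed P R).Pairwise (· < ·) := by
  have hle : (aCompressed P R).Pairwise (fun a b => a ≤ b) := PySem.List.sorted_pairwise _ _
  have hnd : (aCompressed P R).Nodup :=
    (PySem.List.sorted_perm (aAllPositions P R) (fun x => x) false).nodup_iff.2 (pv_allPos_nodup P R)
  exact (hle.and hnd).imp (fun h => lt_of_le_of_ne h.1 h.2)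

theorem pv_C_nodup (P : List Int) (R : List (Int × Int × Int)) : (aCompressed P R).Nodup :=
  (pv_C_pairwise P R).imp (fun h => ne_of_lt h)

theorem pv_C_mem (P : List Int) (R : List (Int × Int × Int)) (x : Int) :
    x ∈ aCompressed P R ↔ x ∈ P ∨ ∃ lrt ∈ R, x = lrt.1 ∨ x = lrt.2.1 := by
  rw [aCompressed, PySem.List.mem_sorted, pv_allPos_mem]

-- the tree_array fold
theorem pv_treeFold (C : List Int) (hC : C.Nodup) (d : PySem.Dict Int Int)
    (hd : ∀ (k : Nat) (hk : k < C.length), d.getD (C[k]) 0 = (k : Int)) :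
    ∀ (Q : List Int) (hQ : ∀ q ∈ Q, q ∈ C) (arr : List Int) (hlen : arr.length = C.length),
      (Q.foldl (fun a pos => PySem.List.pySetD a (d.getD pos 0) 1) arr).length = C.length ∧
      ∀ (k : Nat) (hk : k < C.length) (hk2 : k < (Q.foldl (fun a pos => PySem.List.pySetD a (d.getD pos 0) 1) arr).length),
        (Q.foldl (fun a pos => PySem.List.pySetD a (d.getD pos 0) 1) arr)[k] =
          if C[k] ∈ Q then 1 else arr[k]'(by omega) := by
  intro Q
  induction Q with
  | nil => intro _ arr hlen; refine ⟨hlen, ?_⟩; intro k hk hk2; simp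
  | cons q Q ih =>
    intro hQ arr hlen
    obtain ⟨kq, hkq, hq⟩ := List.getElem_of_mem (hQ q (List.mem_cons_self))
    have hidx : d.getD q 0 = (kq : Int) := by rw [← hq]; exact hd kq hkq
    have harr' : (PySem.List.pySetD arr (d.getD q 0) 1) = arr.set kq 1 := by
      rw [hidx, PySem.List.pySetD_natCast]
    simp only [List.foldl_cons, harr']
    have hlen' : (arr.set kq 1).length = C.length := by simp [hlen]
    obtain ⟨hl, he⟩ := ih (fun p hp => hQ p (List.mem_cons_of_mem _ hp)) (arr.set kq 1) hlen'
    refine ⟨hl, ?_⟩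
    intro k hk hk2
    rw [he k hk hk2]
    have hset : (arr.set kq 1)[k]'(by omega) = if kq = k then 1 else arr[k]'(by omega) := by
      rw [List.getElem_set]
    by_cases hmem : C[k] ∈ Q
    · simp [hmem]
    · have hiff : C[k] = q ↔ kq = k := by
        constructor
        · intro h
          have hkk : C[kq] = C[k] := by rw [hq, h]
          exact (List.Nodup.getElem_inj_iff hC).1 hkk
        · intro h
          have h2 : C[k]? = some q := by
            rw [← h, List.getElem?_eq_getElem hkq, hq]
          rw [List.getElem?_eq_getElem hk] at h2
          exact Option.some.inj h2
      simp only [hmem, if_false, List.mem_cons, hmem, or_false, hset]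
      by_cases hck : C[k] = q
      · rw [if_pos hck, if_pos (hiff.1 hck)]
      · rw [if_neg hck, if_neg (fun h => hck (hiff.2 h))]

-- the prefix_sum fold
theorem pv_prefixFold (ta : List Int) :
    ∀ (j : Nat), j ≤ ta.length →
      ((PySem.List.pyRange 0 (j : Int) 1).foldl
        (fun ps i => PySem.List.pySetD ps (i + 1) (PySem.List.pyGetD ps i 0 + PySem.List.pyGetD ta i 0))
        (List.replicate (ta.length + 1) (0 : Int))).length = ta.length + 1 ∧
      ∀ (k : Nat) (hk : k ≤ ta.length) (hk2 : k < ((PySem.List.pyRange 0 (j : Int) 1).foldl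
        (fun ps i => PySem.List.pySetD ps (i + 1) (PySem.List.pyGetD ps i 0 + PySem.List.pyGetD ta i 0))
        (List.replicate (ta.length + 1) (0 : Int))).length),
        ((PySem.List.pyRange 0 (j : Int) 1).foldl
          (fun ps i => PySem.List.pySetD ps (i + 1) (PySem.List.pyGetD ps i 0 + PySem.List.pyGetD ta i 0))
          (List.replicate (ta.length + 1) (0 : Int)))[k] =
          if k ≤ j then (ta.take k).sum else 0 := by
  intro j
  induction j with
  | zero =>
    intro _
    rw [show ((0 : Nat) : Int) = 0 by norm_num, PySem.List.pyRange_one_eq_nil (by omega)]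
    refine ⟨by simp, ?_⟩
    intro k hk hk2
    simp only [List.foldl_nil, List.getElem_replicate]
    by_cases h : k = 0
    · simp [h]
    · rw [if_neg (by omega)]
  | succ j ih =>
    intro hj
    obtain ⟨ihl, ihe⟩ := ih (by omega)
    have hsplit : PySem.List.pyRange 0 ((j + 1 : Nat) : Int) 1 =
        PySem.List.pyRange 0 (j : Int) 1 ++ [(j : Int)] := by
      push_cast
      exact PySem.List.pyRange_one_succ_right (by omega)
    rw [hsplit, List.foldl_append, List.foldl_cons, List.foldl_nil]
    set psj := (PySem.List.pyRange 0 (j : Int) 1).foldl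
      (fun ps i => PySem.List.pySetD ps (i + 1) (PySem.List.pyGetD ps i 0 + PySem.List.pyGetD ta i 0))
      (List.replicate (ta.length + 1) (0 : Int)) with hpsj
    have hgps : PySem.List.pyGetD psj (j : Int) 0 = (ta.take j).sum := by
      rw [PySem.List.pyGetD_natCast, List.getD_eq_getElem _ _ (by omega), ihe j (by omega) (by omega)]
      rw [if_pos (le_refl j)]
    have hgta : PySem.List.pyGetD ta (j : Int) 0 = ta[j]'(by omega) := by
      rw [PySem.List.pyGetD_natCast, List.getD_eq_getElem _ _ (by omega)]
    have hcast : ((j : Int) + 1) = ((j + 1 : Nat) : Int) := by push_cast; ring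
    rw [hgps, hgta, hcast, PySem.List.pySetD_natCast]
    have hlen : (psj.set (j + 1) ((ta.take j).sum + ta[j]'(by omega))).length = ta.length + 1 := by
      simp [ihl]
    refine ⟨hlen, ?_⟩
    intro k hk hk2
    have hset : (psj.set (j + 1) ((ta.take j).sum + ta[j]'(by omega)))[k]'(by omega) =
        if j + 1 = k then ((ta.take j).sum + ta[j]'(by omega)) else psj[k]'(by omega) := by
      rw [List.getElem_set]
    rw [hset]
    by_cases hkj : j + 1 = k
    · rw [if_pos hkj, if_pos (by omega), ← hkj]
      exact (List.sum_take_succ ta j (by omega)).symm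
    · rw [if_neg hkj, ihe k hk (by omega)]
      by_cases hkj' : k ≤ j
      · rw [if_pos hkj', if_pos (by omega)]
      · rw [if_neg hkj', if_neg (by omega)]

-- distinct-position counts both programs compute
def pvInR (l r p : Int) : Bool := decide (l ≤ p) && decide (p ≤ r)

def pvCntLe (P : List Int) (r : Int) : Nat :=
  (PySem.Set.ofList P).countP (fun p => decide (p ≤ r))

def pvCntLt (P : List Int) (l : Int) : Nat :=
  (PySem.Set.ofList P).countP (fun p => decide (p < l))

def pvCut (P : List Int) (mid l r : Int) : Nat :=
  ((PySem.Set.ofList (P.take mid.toNat)).filter (pvInR l r)).length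

def pvCond (P : List Int) (mid : Int) (lrt : Int × Int × Int) : Prop :=
  lrt.2.2 ≤ (pvCntLe P lrt.2.1 : Int) - (pvCntLt P lrt.1 : Int) - (pvCut P mid lrt.1 lrt.2.1 : Int)

theorem pv_countP_C_eq (P : List Int) (R : List (Int × Int × Int)) (q : Int → Bool) :
    (aCompressed P R).countP (fun p => decide (p ∈ P) && q p) = (PySem.Set.ofList P).countP q := by
  rw [List.countP_eq_length_filter, List.countP_eq_length_filter]
  apply pv_length_eq_of_nodup_mem
  · exact (pv_C_nodup P R).filter _
  · exact (PySem.Set.nodup_ofList P).filter _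
  · intro x
    rw [List.mem_filter, List.mem_filter, PySem.Set.mem_ofList]
    constructor
    · rintro ⟨hxC, hq⟩
      simp only [Bool.and_eq_true, decide_eq_true_eq] at hq
      exact ⟨hq.1, hq.2⟩
    · rintro ⟨hxP, hq⟩
      refine ⟨(pv_C_mem P R x).2 (Or.inl hxP), ?_⟩
      simp only [Bool.and_eq_true, decide_eq_true_eq]
      exact ⟨hxP, hq⟩

-- A's validity test, in terms of the distinct-count specification
theorem pv_aValid_iff (P : List Int) (R : List (Int × Int × Int))
    (d : PySem.Dict Int Int) (ps : List Int)
    (hd : ∀ (k : Nat) (hk : k < (aCompressed P R).length), d.getD ((aCompressed P R)[k]) 0 = (k : Int))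
    (hpslen : ps.length = (aCompressed P R).length + 1)
    (hps : ∀ (k : Nat) (hk : k ≤ (aCompressed P R).length) (hk2 : k < ps.length),
      ps[k] = (((aCompressed P R).take k).countP (fun p => decide (p ∈ P)) : Int))
    (mid : Int) (hmid : 0 ≤ mid) :
    (aValid P R d ps mid = true) ↔ ∀ lrt ∈ R, pvCond P mid lrt := by
  unfold aValid
  simp only [pv_foldl_break_eq_all, List.all_eq_true]
  apply forall_congr'
  intro lrt
  apply imp_congr_right
  intro hl
  obtain ⟨l, r, t⟩ := lrt
  dsimp only
  have hlC : l ∈ aCompressed P R := (pv_C_mem P R l).2 (Or.inr ⟨(l, r, t), hl, Or.inl rfl⟩)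
  have hrC : r ∈ aCompressed P R := (pv_C_mem P R r).2 (Or.inr ⟨(l, r, t), hl, Or.inr rfl⟩)
  obtain ⟨kl, hkl, hkleq⟩ := List.getElem_of_mem hlC
  obtain ⟨kr, hkr, hkreq⟩ := List.getElem_of_mem hrC
  have hdl : d.getD l 0 = (kl : Int) := by rw [← hkleq]; exact hd kl hkl
  have hdr : d.getD r 0 = (kr : Int) := by rw [← hkreq]; exact hd kr hkr
  have hgl : PySem.List.pyGetD ps ((kl : Int)) 0 = (pvCntLt P l : Int) := by
    rw [PySem.List.pyGetD_natCast, List.getD_eq_getElem _ _ (by omega),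
      hps kl (by omega) (by omega)]
    have htake := pv_take_eq_filter_lt (aCompressed P R) (pv_C_pairwise P R) kl hkl
    rw [hkleq] at htake
    rw [htake, List.countP_filter]
    rw [pv_countP_C_eq P R (fun p => decide (p < l))]
    rfl
  have hgr : PySem.List.pyGetD ps ((kr : Int) + 1) 0 = (pvCntLe P r : Int) := by
    rw [show ((kr : Int) + 1) = ((kr + 1 : Nat) : Int) by push_cast; ring]
    rw [PySem.List.pyGetD_natCast, List.getD_eq_getElem _ _ (by omega),
      hps (kr + 1) (by omega) (by omega)]
    have htake := pv_take_succ_eq_filter_le (aCompressed P R) (pv_C_pairwise P R) kr hkr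
    rw [hkreq] at htake
    rw [htake, List.countP_filter]
    rw [pv_countP_C_eq P R (fun p => decide (p ≤ r))]
    rfl
  have hcut : (PySem.Set.inter (PySem.Set.ofList (PySem.List.slice P none (some mid)))
      (PySem.Set.ofList (PySem.List.pyRange l (r + 1) 1))).length = pvCut P mid l r := by
    rw [PySem.List.slice_to _ hmid]
    apply pv_length_eq_of_nodup_mem
    · exact PySem.Set.nodup_inter _ _ (PySem.Set.nodup_ofList _)
    · exact (PySem.Set.nodup_ofList _).filter _
    · intro x
      simp only [PySem.Set.mem_inter, List.mem_filter, PySem.Set.mem_ofList,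
        PySem.List.mem_pyRange_one]
      unfold pvInR
      simp only [Bool.and_eq_true, decide_eq_true_eq]
      constructor <;> rintro ⟨hx1, hx2, hx3⟩ <;> exact ⟨hx1, hx2, by omega⟩
  rw [hdl, hdr, hgl, hgr, hcut]
  unfold pvCond
  simp only [Bool.not_eq_true', decide_eq_false_iff_not, not_lt]

-- B's per-restriction bound, via the same counts
theorem pv_cond_iff_bound (P : List Int) (N : Int) (hN : 0 ≤ N) (lrt : Int × Int × Int)
    (mid : Int) (hmid : 0 ≤ mid) (hmN : mid ≤ N) :
    pvCond P mid lrt ↔ mid ≤ bBound N (bFirsts P) lrt := by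
  obtain ⟨l, r, t⟩ := lrt
  obtain ⟨h1, h2, h3, h4, h5⟩ := pv_fold_spec P
  rw [pv_bFirsts_eq]
  unfold bBound
  dsimp only
  have hle : ((pvFold P).2.countP (fun jp => decide (jp.2 ≤ r))) = pvCntLe P r := by
    unfold pvCntLe
    rw [← h2, List.countP_map]
    rfl
  have hlt : ((pvFold P).2.countP (fun jp => decide (jp.2 < l))) = pvCntLt P l := by
    unfold pvCntLt
    rw [← h2, List.countP_map]
    rfl
  set occ := (((pvFold P).2.filter (fun jp => decide (l ≤ jp.2) && decide (jp.2 ≤ r))).map (·.1)) with hocc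
  have hocc_pair : occ.Pairwise (· < ·) := by
    rw [hocc, List.pairwise_map]
    exact h3.sublist List.filter_sublist
  have hocc_mem : ∀ j ∈ occ, 0 ≤ j := by
    intro j hj
    rw [hocc, List.mem_map] at hj
    obtain ⟨jp, hjp, rfl⟩ := hj
    exact (h4 jp (List.mem_of_mem_filter hjp)).1
  have hY : pvCut P mid l r =
      (((pvFold P).2.filter (fun jp => decide (jp.1 < mid) &&
        (decide (l ≤ jp.2) && decide (jp.2 ≤ r)))).map (·.2)).length := by
    unfold pvCut
    apply pv_length_eq_of_nodup_mem
    · exact (PySem.Set.nodup_ofList _).filter _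
    · have hsub : (((pvFold P).2.filter (fun jp => decide (jp.1 < mid) &&
          (decide (l ≤ jp.2) && decide (jp.2 ≤ r)))).map (·.2)).Sublist ((pvFold P).2.map (·.2)) :=
        List.Sublist.map _ List.filter_sublist
      rw [h2] at hsub
      exact (PySem.Set.nodup_ofList P).sublist hsub
    · intro x
      rw [List.mem_filter, PySem.Set.mem_ofList, List.mem_map]
      constructor
      · rintro ⟨hxtake, hxr⟩
        have hxP : x ∈ (pvFold P).2.map (·.2) := by
          rw [h2]
          exact (PySem.Set.mem_ofList _ _).2 (List.mem_of_mem_take hxtake)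
        obtain ⟨jp, hjp, hjpx⟩ := List.mem_map.1 hxP
        refine ⟨jp, List.mem_filter.2 ⟨hjp, ?_⟩, hjpx⟩
        have hjlt : jp.1 < mid := by
          have h5' := (h5 jp hjp mid.toNat).2 (by rw [hjpx]; exact hxtake)
          omega
        unfold pvInR at hxr
        simp only [Bool.and_eq_true, decide_eq_true_eq] at hxr ⊢
        rw [hjpx]
        exact ⟨by omega, hxr⟩
      · rintro ⟨jp, hjp, rfl⟩
        rw [List.mem_filter] at hjp
        obtain ⟨hjpF, hjpP⟩ := hjp
        simp only [Bool.and_eq_true, decide_eq_true_eq] at hjpP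
        constructor
        · have := (h5 jp hjpF mid.toNat).1 (by omega)
          exact this
        · unfold pvInR
          simp only [Bool.and_eq_true, decide_eq_true_eq]
          exact hjpP.2
  have hcutP : pvCut P mid l r = occ.countP (fun j => decide (j < mid)) := by
    have e1 : occ.countP (fun j => decide (j < mid)) =
        (pvFold P).2.countP (fun jp => decide (jp.1 < mid) &&
          (decide (l ≤ jp.2) && decide (jp.2 ≤ r))) := by
      rw [hocc, List.countP_map, List.countP_filter]
      rfl
    rw [e1, List.countP_eq_length_filter, hY, List.length_map]
  have hcond : pvCond P mid (l, r, t) ↔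
      (occ.countP (fun j => decide (j < mid)) : Int) ≤ ((pvCntLe P r : Int) - (pvCntLt P l : Int)) - t := by
    unfold pvCond
    dsimp only
    omega
  rw [hle, hlt]
  by_cases c1 : ((pvCntLe P r : Int) - (pvCntLt P l : Int)) - t < 0
  · rw [if_pos c1]
    apply iff_of_false
    · intro h
      have := hcond.1 h
      omega
    · omega
  · rw [if_neg c1]
    by_cases c2 : ((pvCntLe P r : Int) - (pvCntLt P l : Int)) - t < (occ.length : Int)
    · rw [if_pos c2]
      have ha : (((pvCntLe P r : Int) - (pvCntLt P l : Int)) - t).toNat < occ.length := by omega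
      have hth := pv_countP_lt_sorted occ hocc_pair _ ha mid
      have hg : PySem.List.pyGetD occ (((pvCntLe P r : Int) - (pvCntLt P l : Int)) - t) 0 =
          occ[(((pvCntLe P r : Int) - (pvCntLt P l : Int)) - t).toNat]'(by omega) :=
        PySem.List.pyGetD_eq_getElem _ _ (by omega) (by omega)
      rw [hg, hcond, ← hth]
      omega
    · rw [if_neg c2]
      apply iff_of_true
      · apply hcond.2
        have hcle : occ.countP (fun j => decide (j < mid)) ≤ occ.length := List.countP_le_length
        omega
      · exact hmN

-- every per-restriction bound is -1, a (nonnegative) order index, or N itself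
theorem pv_bBound_ge (P : List Int) (N : Int) (lrt : Int × Int × Int) :
    min (-1) N ≤ bBound N (bFirsts P) lrt := by
  obtain ⟨l, r, t⟩ := lrt
  obtain ⟨h1, h2, h3, h4, h5⟩ := pv_fold_spec P
  rw [pv_bFirsts_eq]
  unfold bBound
  dsimp only
  set occ := (((pvFold P).2.filter (fun jp => decide (l ≤ jp.2) && decide (jp.2 ≤ r))).map (·.1)) with hocc
  set allow := (((pvFold P).2.countP (fun jp => decide (jp.2 ≤ r)) : Int) -
    ((pvFold P).2.countP (fun jp => decide (jp.2 < l)) : Int)) - t with hallow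
  by_cases c1 : allow < 0
  · rw [if_pos c1]; omega
  · rw [if_neg c1]
    by_cases c2 : allow < (occ.length : Int)
    · rw [if_pos c2]
      have hg : PySem.List.pyGetD occ allow 0 = occ[allow.toNat]'(by omega) :=
        PySem.List.pyGetD_eq_getElem _ _ (by omega) (by omega)
      rw [hg]
      have hoccmem : ∀ j ∈ occ, 0 ≤ j := by
        intro j hj
        rw [hocc, List.mem_map] at hj
        obtain ⟨jp, hjp, rfl⟩ := hj
        exact (h4 jp (List.mem_of_mem_filter hjp)).1
      have : 0 ≤ occ[allow.toNat]'(by omega) := hoccmem _ (List.getElem_mem _)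
      omega
    · rw [if_neg c2]
      omega

-- the tree_array is the 0/1 indicator of positions along compressed
theorem pv_ta_eq (P : List Int) (R : List (Int × Int × Int)) :
    aTreeArray P (aPosToIndex (aCompressed P R)) (aCompressed P R).length =
      (aCompressed P R).map (fun p => if p ∈ P then (1 : Int) else 0) := by
  obtain ⟨htl, hte⟩ := pv_treeFold (aCompressed P R) (pv_C_nodup P R)
    (aPosToIndex (aCompressed P R)) (pv_dictOf_getD _ (pv_C_nodup P R)) P
    (fun q hq => (pv_C_mem P R q).2 (Or.inl hq))
    (List.replicate (aCompressed P R).length (0 : Int)) (by simp)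
  unfold aTreeArray
  apply List.ext_getElem (by simpa using htl)
  intro k h1 h2
  have h3 := hte k (by simpa [List.length_map] using h2) (by rw [htl]; simpa [List.length_map] using h2)
  rw [List.getElem_map, h3]
  by_cases hm : (aCompressed P R)[k]'(by simpa [List.length_map] using h2) ∈ P
  · rw [if_pos hm, if_pos hm]
  · rw [if_neg hm, if_neg hm, List.getElem_replicate]

theorem pv_sum_ite (l : List Int) (P : List Int) :
    (l.map (fun p => if p ∈ P then (1 : Int) else 0)).sum = (l.countP (fun p => decide (p ∈ P)) : Int) := by
  induction l with
  | nil => simp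
  | cons x l ih =>
    rw [List.map_cons, List.sum_cons, ih, List.countP_cons]
    by_cases h : x ∈ P <;> simp [h] <;> omega

theorem pv_prefix_spec (ta : List Int) (n : Nat) (hn : ta.length = n) :
    (aPrefixSum ta n).length = n + 1 ∧
    ∀ (k : Nat), k ≤ n → ∀ (hk2 : k < (aPrefixSum ta n).length),
      (aPrefixSum ta n)[k] = (ta.take k).sum := by
  subst hn
  unfold aPrefixSum
  obtain ⟨hl, he⟩ := pv_prefixFold ta ta.length le_rfl
  exact ⟨hl, fun k hk hk2 => by rw [he k hk hk2, if_pos hk]⟩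

theorem pv_case_eq (c : Int × Int × List Int × (List (Int × Int × Int))) : aCase c = bCase c := by
  obtain ⟨N, K, P, R⟩ := c
  simp only [aCase, bCase]
  by_cases hN : N < 0
  · -- A's binary search exits at once with high = N; B's min-fold starts at N and
    -- every bound is ≥ min (-1) N = N, so the fold also returns N
    rw [aSearch, dif_neg (by omega)]
    have h1 : R.foldl (fun ans lrt => min ans (bBound N (bFirsts P) lrt)) N ≤ N :=
      pv_foldl_min_le_init R _ N
    have h2 : N ≤ R.foldl (fun ans lrt => min ans (bBound N (bFirsts P) lrt)) N :=
      (pv_le_foldl_min R _ N N).2 ⟨le_rfl, fun lrt _ => by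
        have := pv_bBound_ge P N lrt; omega⟩
    omega
  · have hta := pv_ta_eq P R
    have htalen : (aTreeArray P (aPosToIndex (aCompressed P R)) (aCompressed P R).length).length =
        (aCompressed P R).length := by rw [hta]; simp
    obtain ⟨hpslen, hpse⟩ := pv_prefix_spec
      (aTreeArray P (aPosToIndex (aCompressed P R)) (aCompressed P R).length)
      (aCompressed P R).length htalen
    have hps : ∀ (k : Nat) (hk : k ≤ (aCompressed P R).length)
        (hk2 : k < (aPrefixSum (aTreeArray P (aPosToIndex (aCompressed P R)) (aCompressed P R).length)
          (aCompressed P R).length).length),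
        (aPrefixSum (aTreeArray P (aPosToIndex (aCompressed P R)) (aCompressed P R).length)
          (aCompressed P R).length)[k] =
          (((aCompressed P R).take k).countP (fun p => decide (p ∈ P)) : Int) := by
      intro k hk hk2
      rw [hpse k hk hk2, hta, ← List.map_take, pv_sum_ite]
    have hm1 : (-1 : Int) ≤ R.foldl (fun ans lrt => min ans (bBound N (bFirsts P) lrt)) N :=
      (pv_le_foldl_min R _ N (-1)).2 ⟨by omega, fun lrt _ => by
        have := pv_bBound_ge P N lrt; omega⟩
    have hm2 : R.foldl (fun ans lrt => min ans (bBound N (bFirsts P) lrt)) N ≤ N :=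
      pv_foldl_min_le_init R _ N
    apply pv_aSearch_eq _ N _ ?_ (N + 1).toNat 0 N (by omega) (by omega) (by omega) (by omega) (by omega)
    intro m h0 hmN
    rw [pv_aValid_iff P R (aPosToIndex (aCompressed P R)) _ (pv_dictOf_getD _ (pv_C_nodup P R))
      hpslen hps m h0]
    rw [pv_le_foldl_min]
    constructor
    · intro h
      exact ⟨hmN, fun lrt hl => (pv_cond_iff_bound P N (by omega) lrt m h0 hmN).1 (h lrt hl)⟩
    · intro h lrt hl
      exact (pv_cond_iff_bound P N (by omega) lrt m h0 hmN).2 (h.2 lrt hl)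

-- ===== VERDICT (by name: the statement is the Claim_ definition above) =====
theorem solve_farm_problem_spec : Claim_equal_solve_farm_problem := by
  intro tcs _
  unfold Spec_solve_farm_problem solve_farm_problem solve_farm_problem_alt
  rw [PySem.List.foldl_append_singleton_eq_map]
  simp [pv_case_eq]
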